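-- pv_equiv track=rewrite | github.com/gosh-dot-ai/gosh.memory | src/episode_retrieval.py | _move_row_to_front
-- ===== SOURCE A (Python) =====
-- def _move_row_to_front(rows: list[dict], episode_id: str | None) -> list[dict]:
--     if not episode_id:
--         return rows
--     front = None
--     remainder = []
--     for row in rows:
--         if row["episode_id"] == episode_id and front is None:
--             front = row
--         else:
--             remainder.append(row)
--     if front is None:
--         return rows
--     return [front] + remainder
-- ===== SOURCE B (Python) =====
-- def _move_row_to_front(rows: list[dict], episode_id: str | None) -> list[dict]:
--     if not episode_id:
--         return rows
--     for i, row in enumerate(rows):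
--         if row["episode_id"] == episode_id:
--             return [row] + rows[:i] + rows[i + 1:]
--     return rows
-- ===== Notes on version B (the rewrite author's own statement) =====
-- stated objective: simpler
-- what changed: B finds the first matching index in an enumerate loop with an early return and rebuilds the list by slice-concatenation around it, instead of threading a front/remainder accumulator pair through a full scan.
import Mathlib
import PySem

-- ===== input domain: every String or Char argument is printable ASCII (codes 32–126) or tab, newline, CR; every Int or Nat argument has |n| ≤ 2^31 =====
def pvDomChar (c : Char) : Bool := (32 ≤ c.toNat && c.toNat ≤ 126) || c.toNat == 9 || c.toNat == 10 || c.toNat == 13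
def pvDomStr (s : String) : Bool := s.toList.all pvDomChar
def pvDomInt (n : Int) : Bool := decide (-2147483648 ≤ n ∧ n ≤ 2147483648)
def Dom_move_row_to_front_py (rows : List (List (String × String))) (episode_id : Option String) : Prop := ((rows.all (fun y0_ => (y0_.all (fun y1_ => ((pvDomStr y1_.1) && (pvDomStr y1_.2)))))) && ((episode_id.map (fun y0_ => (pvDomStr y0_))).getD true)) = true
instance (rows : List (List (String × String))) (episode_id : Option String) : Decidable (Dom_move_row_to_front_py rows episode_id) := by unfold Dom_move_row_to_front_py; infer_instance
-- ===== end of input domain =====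

-- B replaces A's front/remainder accumulator scan by an indexed first-match search
-- plus slice-concatenation; return values only are compared (neither mutates).

-- ===== PORT A =====
-- row["episode_id"]: KeyError (excluded by Pre_) is rendered as getD with default "",
-- which never equals a truthy episode_id, so admitted inputs are computed exactly.
def move_row_to_front_py (rows : List (List (String × String))) (episode_id : Option String) : List (List (String × String)) :=
  match episode_id with
  | none => rows
  | some eid =>
    if eid == "" then rows
    else
      let st := rows.foldl
        (fun (st : Option (List (String × String)) × List (List (String × String))) row =>
          if (PySem.Dict.mk row).getD "episode_id" "" == eid && st.1.isNone then
            (some row, st.2)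
          else
            (st.1, st.2 ++ [row]))
        (none, [])
      match st.1 with
      | none => rows
      | some front => front :: st.2

-- ===== PORT B =====
-- enumerate loop returning the first matching (row, index); rows[:i] / rows[i+1:]
-- with 0 ≤ i < len(rows) are List.take i / List.drop (i+1).
def pvFindFirst (eid : String) : List (List (String × String)) → Nat → Option (List (String × String) × Nat)
  | [], _ => none
  | r :: rs, i =>
    if (PySem.Dict.mk r).getD "episode_id" "" == eid then some (r, i)
    else pvFindFirst eid rs (i + 1)

def move_row_to_front_py_alt (rows : List (List (String × String))) (episode_id : Option String) : List (List (String × String)) :=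
  match episode_id with
  | none => rows
  | some eid =>
    if eid == "" then rows
    else
      match pvFindFirst eid rows 0 with
      | none => rows
      | some (row, i) => [row] ++ rows.take i ++ rows.drop (i + 1)

-- ===== PRECONDITION & SPEC =====
-- Pre_ excludes exactly the inputs on which Python A raises KeyError: a truthy
-- episode_id together with some row lacking the "episode_id" key.
def Pre_move_row_to_front_py (rows : List (List (String × String))) (episode_id : Option String) : Prop :=
  episode_id = none ∨ episode_id = some "" ∨
    ∀ row ∈ rows, (PySem.Dict.mk row).contains "episode_id" = true
instance (rows : List (List (String × String))) (episode_id : Option String) : Decidable (Pre_move_row_to_front_py rows episode_id) := by unfold Pre_move_row_to_front_py; infer_instance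

def pvWitness_move_row_to_front_py : (List (List (String × String))) × Option String :=
  ([[("episode_id", "a")], [("episode_id", "e")]], some "e")

def Spec_move_row_to_front_py (rows : List (List (String × String))) (episode_id : Option String) (out : List (List (String × String))) : Prop := out = move_row_to_front_py_alt rows episode_id
instance (rows : List (List (String × String))) (episode_id : Option String) (out : List (List (String × String))) : Decidable (Spec_move_row_to_front_py rows episode_id out) := by unfold Spec_move_row_to_front_py; infer_instance

-- ===== CLAIM (what is proved, stated in full; the proofs are below) =====
def Claim_equal_move_row_to_front_py : Prop := ∀ (rows : List (List (String × String))) (episode_id : Option String), Dom_move_row_to_front_py rows episode_id → Pre_move_row_to_front_py rows episode_id → Spec_move_row_to_front_py rows episode_id (move_row_to_front_py rows episode_id)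

-- ===== LEMMAS AND PROOFS =====

-- Once A's loop has found a front, the rest of the rows are appended unchanged.
theorem pvFoldFound (eid : String) (rs : List (List (String × String)))
    (f : List (String × String)) (rem : List (List (String × String))) :
    rs.foldl
      (fun (st : Option (List (String × String)) × List (List (String × String))) row =>
        if (PySem.Dict.mk row).getD "episode_id" "" == eid && st.1.isNone then
          (some row, st.2)
        else
          (st.1, st.2 ++ [row]))
      (some f, rem) = (some f, rem ++ rs) := by
  induction rs generalizing rem with
  | nil => simp
  | cons r rs ih =>
    simp only [List.foldl, Option.isNone_some, Bool.and_false, Bool.false_eq_true, if_false]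
    rw [ih (rem ++ [r])]
    simp

-- Shifting the start index of pvFindFirst shifts the returned index.
theorem pvFindShift (eid : String) (rs : List (List (String × String))) (i : Nat) :
    pvFindFirst eid rs (i + 1) = (pvFindFirst eid rs i).map (fun p => (p.1, p.2 + 1)) := by
  induction rs generalizing i with
  | nil => simp [pvFindFirst]
  | cons r rs ih =>
    by_cases h : ((PySem.Dict.mk r).getD "episode_id" "" == eid) = true
    · simp [pvFindFirst, h]
    · simp [pvFindFirst, h, ih]

-- A's loop from a none-front state, characterised by B's first-match search.
theorem pvFoldChar (eid : String) (rows : List (List (String × String)))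
    (rem : List (List (String × String))) :
    rows.foldl
      (fun (st : Option (List (String × String)) × List (List (String × String))) row =>
        if (PySem.Dict.mk row).getD "episode_id" "" == eid && st.1.isNone then
          (some row, st.2)
        else
          (st.1, st.2 ++ [row]))
      (none, rem) =
      match pvFindFirst eid rows 0 with
      | none => (none, rem ++ rows)
      | some (r, j) => (some r, rem ++ rows.take j ++ rows.drop (j + 1)) := by
  induction rows generalizing rem with
  | nil => simp [pvFindFirst]
  | cons r rs ih =>
    by_cases h : ((PySem.Dict.mk r).getD "episode_id" "" == eid) = true
    · simp only [List.foldl, pvFindFirst, h, Option.isNone_none, Bool.and_true, if_pos]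
      rw [pvFoldFound]
      simp
    · have hs := pvFindShift eid rs 0
      simp only [List.foldl, pvFindFirst, h, Option.isNone_none, Bool.and_true,
        Bool.false_eq_true, if_false]
      rw [ih (rem ++ [r]), hs]
      cases hf : pvFindFirst eid rs 0 with
      | none => simp
      | some p =>
        rcases p with ⟨r', j⟩
        simp [List.take_succ_cons, List.drop_succ_cons, List.append_assoc]

-- ===== VERDICT (by name: the statement is the Claim_ definition above) =====
theorem move_row_to_front_py_spec : Claim_equal_move_row_to_front_py := by
  intro rows episode_id _ _
  unfold Spec_move_row_to_front_py move_row_to_front_py move_row_to_front_py_alt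
  cases episode_id with
  | none => rfl
  | some eid =>
    by_cases he : (eid == "") = true
    · simp [he]
    · simp only [he]
      rw [pvFoldChar eid rows []]
      cases hf : pvFindFirst eid rows 0 with
      | none => simp
      | some p => rcases p with ⟨r, j⟩; simp
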